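-- pv_equiv track=rewrite | github.com/Binghankina/ESearchWithNLPKnowledgeGraph | rest_api/tools/table_process.py | rows_merge
-- ===== SOURCE A (Python) =====
-- def list_clean_row(l):
--     return_l = []
--     for e in l:
--         if "ph_l" in e or "ph_u" in e or "<protect>" in e:
--             e = e.replace("ph_l", "")
--             e = e.replace("ph_u", "")
--             e = e.replace("<protect>", "")
--         return_l.append(e)
--     return return_l
--
-- def rows_merge(table, column):
--     row_len = len(table)
--     if row_len > 0:
--         return_table = []
--         for i, l in enumerate(table):
--             temp_list = []
--             if "ph_u" in l[column]:
--                 prev_list_cleaned = list_clean_row(return_table[-1])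
--                 l_cleaned = list_clean_row(l)
--                 for x, y in zip(prev_list_cleaned, l_cleaned):
--                     if x == y:
--                         temp_list.append(x)
--                     else:
--                         temp_list.append(x + y)
--                 return_table[-1] = temp_list
--             else:
--                 return_table.append(l)
--         return return_table
--     else:
--         return table
-- ===== SOURCE B (Python) =====
-- def list_clean_row(l):
--     return_l = []
--     for e in l:
--         if "ph_l" in e or "ph_u" in e or "<protect>" in e:
--             e = e.replace("ph_l", "")
--             e = e.replace("ph_u", "")
--             e = e.replace("<protect>", "")
--         return_l.append(e)
--     return return_l
--
-- def rows_merge(table, column):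
--     result = []
--     i = 0
--     n = len(table)
--     while i < n:
--         acc = table[i]
--         i += 1
--         while i < n and "ph_u" in table[i][column]:
--             a = list_clean_row(acc)
--             b = list_clean_row(table[i])
--             acc = [x if x == y else x + y for x, y in zip(a, b)]
--             i += 1
--         result.append(acc)
--     return result
-- ===== Notes on version B (the rewrite author's own statement) =====
-- stated objective: alternative
-- what changed: B replaces A's accumulator-list walk (appending rows and destructively rewriting return_table[-1] on every ph_u row) by a run-folding scan: it takes each group-leading row and folds the following ph_u rows into a local accumulator, appending one finished row per run.
import Mathlib
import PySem

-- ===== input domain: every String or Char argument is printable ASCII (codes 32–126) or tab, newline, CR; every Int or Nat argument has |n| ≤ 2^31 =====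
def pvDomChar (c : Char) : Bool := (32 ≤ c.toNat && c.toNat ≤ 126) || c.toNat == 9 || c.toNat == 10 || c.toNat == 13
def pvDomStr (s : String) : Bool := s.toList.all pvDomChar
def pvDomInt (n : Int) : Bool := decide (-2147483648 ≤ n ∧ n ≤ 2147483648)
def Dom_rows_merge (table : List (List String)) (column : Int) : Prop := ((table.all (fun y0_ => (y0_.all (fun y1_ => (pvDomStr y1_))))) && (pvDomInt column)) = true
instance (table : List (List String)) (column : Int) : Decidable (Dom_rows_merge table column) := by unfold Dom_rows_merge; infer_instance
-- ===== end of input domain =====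

-- B: two-phase decomposition — walk the table once, folding each maximal run of ph_u rows
-- into its leading row as it goes (objective: simpler/alternative, same cost).
-- Pre_ excludes inputs where Python A raises (out-of-range column, or a leading ph_u row).

-- ===== PORT A =====
-- shared module helper (identical source in Source A and Source B)
def list_clean_row (l : List String) : List String :=
  l.foldl (fun return_l e =>
    let e := if PySem.Str.isIn "ph_l" e || PySem.Str.isIn "ph_u" e || PySem.Str.isIn "<protect>" e then
        PySem.Str.replace (PySem.Str.replace (PySem.Str.replace e "ph_l" "") "ph_u" "") "<protect>" ""
      else e
    return_l ++ [e]) []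

def rows_merge (table : List (List String)) (column : Int) : List (List String) :=
  if table.length > 0 then
    table.foldl (fun return_table l =>
      -- "ph_u" in l[column]: l[column] raises IndexError out of range — excluded by Pre_, .getD "" is a placeholder there
      if PySem.Str.isIn "ph_u" ((PySem.List.pyGet? l column).getD "") then
        -- return_table[-1] raises IndexError when return_table is empty — excluded by Pre_
        let prev_list_cleaned := list_clean_row ((PySem.List.pyGet? return_table (-1)).getD [])
        let l_cleaned := list_clean_row l
        let temp_list := (prev_list_cleaned.zip l_cleaned).foldl
          (fun temp_list p => if p.1 == p.2 then temp_list ++ [p.1] else temp_list ++ [p.1 ++ p.2]) []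
        return_table.dropLast ++ [temp_list]
      else return_table ++ [l]) []
  else table

-- ===== PORT B =====
def rows_merge_alt_go (column : Int) (acc : List String) : List (List String) → List (List String)
  | [] => [acc]
  | l :: ls =>
      if PySem.Str.isIn "ph_u" ((PySem.List.pyGet? l column).getD "") then
        rows_merge_alt_go column
          (((list_clean_row acc).zip (list_clean_row l)).map (fun p => if p.1 == p.2 then p.1 else p.1 ++ p.2)) ls
      else acc :: rows_merge_alt_go column l ls

def rows_merge_alt (table : List (List String)) (column : Int) : List (List String) :=
  match table with
  | [] => []
  | r :: rest => rows_merge_alt_go column r rest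

-- ===== PRECONDITION & SPEC =====
-- Pre_ excludes exactly the inputs where Python A raises IndexError: a row for which
-- `column` is out of range, or a table whose first row's cell contains "ph_u"
-- (then return_table[-1] is read from an empty list).
def Pre_rows_merge (table : List (List String)) (column : Int) : Prop :=
  (∀ l ∈ table, PySem.Raise.InRange l.length column) ∧
  (table = [] ∨ PySem.Str.isIn "ph_u" ((PySem.List.pyGet? (table.headD []) column).getD "") = false)
instance (table : List (List String)) (column : Int) : Decidable (Pre_rows_merge table column) := by
  unfold Pre_rows_merge; infer_instance

def pvWitness_rows_merge : List (List String) × Int := ([["a", "b"], ["ph_u x", "b"], ["c", "d"]], 0)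


def Spec_rows_merge (table : List (List String)) (column : Int) (out : List (List String)) : Prop := out = rows_merge_alt table column
instance (table : List (List String)) (column : Int) (out : List (List String)) : Decidable (Spec_rows_merge table column out) := by unfold Spec_rows_merge; infer_instance

-- ===== CLAIM (what is proved, stated in full; the proofs are below) =====
def Claim_equal_rows_merge : Prop := ∀ (table : List (List String)) (column : Int), Dom_rows_merge table column → Pre_rows_merge table column → Spec_rows_merge table column (rows_merge table column)


-- ===== LEMMAS AND PROOFS =====

-- A's cell-merge loop (append in a loop over zip) computes B's map over the zip.
lemma temp_list_eq_map (a b : List String) :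
    (a.zip b).foldl (fun t (p : String × String) => if p.1 == p.2 then t ++ [p.1] else t ++ [p.1 ++ p.2]) [] =
    (a.zip b).map (fun p => if p.1 == p.2 then p.1 else p.1 ++ p.2) := by
  have h : ∀ (zs : List (String × String)) (t : List String),
      zs.foldl (fun t (p : String × String) => if p.1 == p.2 then t ++ [p.1] else t ++ [p.1 ++ p.2]) t =
      zs.foldl (fun t (p : String × String) => t ++ [if p.1 == p.2 then p.1 else p.1 ++ p.2]) t := by
    intro zs
    induction zs with
    | nil => intro t; rfl
    | cons p ps ihp =>
      intro t
      by_cases hp : p.1 == p.2 <;> simp only [List.foldl_cons, hp, Bool.false_eq_true, if_true, if_false, ihp]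
  rw [h, PySem.List.foldl_append_singleton_eq_map, List.nil_append]

-- A's loop with a nonempty accumulator rt ++ [r] equals rt ++ B's run-folding walk from r.
lemma loop_eq (column : Int) (ls : List (List String)) :
    ∀ (rt : List (List String)) (r : List String),
      ls.foldl (fun return_table l =>
        if PySem.Str.isIn "ph_u" ((PySem.List.pyGet? l column).getD "") then
          let prev_list_cleaned := list_clean_row ((PySem.List.pyGet? return_table (-1)).getD [])
          let l_cleaned := list_clean_row l
          let temp_list := (prev_list_cleaned.zip l_cleaned).foldl
            (fun temp_list p => if p.1 == p.2 then temp_list ++ [p.1] else temp_list ++ [p.1 ++ p.2]) []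
          return_table.dropLast ++ [temp_list]
        else return_table ++ [l]) (rt ++ [r]) = rt ++ rows_merge_alt_go column r ls := by
  induction ls with
  | nil => intro rt r; simp [rows_merge_alt_go]
  | cons l ls ih =>
    intro rt r
    by_cases hl : PySem.Str.isIn "ph_u" ((PySem.List.pyGet? l column).getD "") = true
    · simp only [List.foldl_cons, hl, if_pos, PySem.List.pyGet?_neg_one_append_singleton,
        Option.getD_some, List.dropLast_concat, rows_merge_alt_go]
      rw [temp_list_eq_map, ih]
    · simp only [List.foldl_cons, hl, if_neg, Bool.not_eq_true, rows_merge_alt_go]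
      rw [ih (rt ++ [r]) l]
      simp

-- ===== VERDICT (by name: the statement is the Claim_ definition above) =====
theorem rows_merge_spec : Claim_equal_rows_merge := by
  intro table column _ hpre
  unfold Spec_rows_merge rows_merge rows_merge_alt
  match table with
  | [] => simp
  | r :: rest =>
    obtain ⟨_, hhead⟩ := hpre
    have hr : PySem.Str.isIn "ph_u" ((PySem.List.pyGet? r column).getD "") = false := by
      rcases hhead with h | h
      · exact absurd h (by simp)
      · simpa using h
    simp only [List.length_cons, List.foldl_cons, hr, Bool.false_eq_true, if_pos,
      Nat.zero_lt_succ, List.nil_append]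
    have := loop_eq column rest [] r
    simpa using this
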